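-- pv_equiv track=rewrite | github.com/Joseph515Ren/Many-body-state | manybodylib.py | real2vec
-- ===== SOURCE A (Python) =====
-- base = 2
--
-- def real2vec(i,n):
--     '''
--     Convertion from index of many-body state to real occupation state
--
--     Return array representing the occupation of each site.
--
--     Parameters
--     ----------
--     i : int
--         Index in whole Hilbeert space
--     n : int
--         Number of particles
--
--     Returns
--     -------
--     vec: [n] vector
--         Occupation
--
--     Examples
--     --------
--     >>> real2vec(0,5)
--     >>> [0, 0, 0, 0, 0]
--
--     >>> real2vec(1,5)
--     >>> [0, 0, 0, 0, 1]
--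
--     >>> real2vec(3,5)
--     >>> [0, 0, 0, 1, 1]
--     '''
--     assert isinstance (i,int), 'i must be integer!'
--     assert isinstance (n,int), 'n must be integer!'
--     assert 0 <= i < base**n, 'i should be in range [0,base**n)!'
--     vec = [0]*n
--     rem = i
--     for j in range(n):
--         vec[j], rem = divmod(rem,2**(n-j-1))
--     return vec
-- ===== SOURCE B (Python) =====
-- base = 2
--
-- def real2vec(i, n):
--     assert isinstance(i, int), 'i must be integer!'
--     assert isinstance(n, int), 'n must be integer!'
--     assert 0 <= i < base**n, 'i should be in range [0,base**n)!'
--     return [(i >> k) & 1 for k in reversed(range(n))]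
-- ===== Notes on version B (the rewrite author's own statement) =====
-- stated objective: faster
-- what changed: B is a stateless one-line comprehension reading each bit directly with shift-and-mask ((i >> k) & 1, k = n-1..0), replacing A's stateful remainder loop that recomputes the n-bit power 2**(n-j-1) and divmods the big remainder by it at every step.
import Mathlib
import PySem

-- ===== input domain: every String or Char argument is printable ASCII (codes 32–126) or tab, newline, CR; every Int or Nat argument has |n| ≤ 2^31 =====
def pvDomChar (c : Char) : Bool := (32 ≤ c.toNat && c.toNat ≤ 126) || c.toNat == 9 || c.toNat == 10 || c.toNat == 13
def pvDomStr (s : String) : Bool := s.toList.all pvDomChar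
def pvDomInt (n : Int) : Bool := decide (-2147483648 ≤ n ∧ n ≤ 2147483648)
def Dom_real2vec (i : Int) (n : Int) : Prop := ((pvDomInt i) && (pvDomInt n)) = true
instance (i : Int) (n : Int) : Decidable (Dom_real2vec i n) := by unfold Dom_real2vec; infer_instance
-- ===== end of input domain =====

-- B reads each occupation bit directly with shift-and-mask ((i >> k) & 1) in a comprehension,
-- instead of A's stateful loop dividing a remainder by shrinking powers; same return value on Pre_.


-- ===== PORT A =====
-- A's loop body: vec[j], rem = divmod(rem, 2**(n-j-1))
def stepA (N : Nat) (st : List Int × Int) (j : Nat) : List Int × Int :=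
  (st.1.set j (PySem.Int.floordiv st.2 ((2 : Int) ^ (N - j - 1))),
   PySem.Int.mod st.2 ((2 : Int) ^ (N - j - 1)))

def real2vec (i : Int) (n : Int) : List Int :=
  ((List.range n.toNat).foldl (stepA n.toNat) (List.replicate n.toNat 0, i)).1

-- ===== PORT B =====
-- [(i >> k) & 1 for k in reversed(range(n))]; Python's '>>' and '&' on ints are exactly
-- Int.shiftRight and Int.land here (two's-complement semantics agree on Int).
def real2vec_alt (i : Int) (n : Int) : List Int :=
  (List.range n.toNat).reverse.map (fun (k : Nat) => Int.land (i >>> k) 1)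

-- ===== PRECONDITION & SPEC =====
-- A's assert '0 <= i < base**n' raises outside this set (for n < 0 Python evaluates 2**n as a
-- positive float down to n = -1074, so i = 0 is accepted there and both programs return []).
def Pre_real2vec (i : Int) (n : Int) : Prop :=
  0 ≤ i ∧ ((0 ≤ n ∧ i.toNat < 2 ^ n.toNat) ∨ (-1074 ≤ n ∧ n < 0 ∧ i = 0))
instance (i : Int) (n : Int) : Decidable (Pre_real2vec i n) := by unfold Pre_real2vec; infer_instance
def pvWitness_real2vec : Int × Int := (5, 3)

def Spec_real2vec (i : Int) (n : Int) (out : List Int) : Prop := out = real2vec_alt i n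
instance (i : Int) (n : Int) (out : List Int) : Decidable (Spec_real2vec i n out) := by unfold Spec_real2vec; infer_instance

-- ===== CLAIM (what is proved, stated in full; the proofs are below) =====
def Claim_equal_real2vec : Prop := ∀ (i : Int) (n : Int), Dom_real2vec i n → Pre_real2vec i n → Spec_real2vec i n (real2vec i n)

-- ===== LEMMAS AND PROOFS =====

-- (a % 2^m) / 2^k % 2 = a / 2^k % 2 for k < m
lemma mod_pow_div_mod (a k m : Nat) (h : k < m) :
    a % 2 ^ m / 2 ^ k % 2 = a / 2 ^ k % 2 := by
  have hm : 2 ^ m = 2 ^ k * 2 ^ (m - k) := by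
    rw [← pow_add]; congr 1; omega
  rw [hm, Nat.mod_mul_right_div_self]
  have hdvd : (2 : Nat) ∣ 2 ^ (m - k) := dvd_pow_self 2 (by omega)
  exact Nat.mod_mod_of_dvd _ hdvd

-- invariant for A's fold: positions s..s+k-1 get the bits of r, others keep v
lemma foldA_get (N : Nat) : ∀ (k s : Nat) (v : List Int) (r : Nat), v.length = N →
    r < 2 ^ (N - s) → s + k ≤ N → ∀ t : Nat,
    (((List.range' s k).foldl (stepA N) (v, (r : Int))).1)[t]? =
      if s ≤ t ∧ t < s + k then some ((r / 2 ^ (N - 1 - t) % 2 : Nat) : Int) else v[t]? := by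
  intro k
  induction k with
  | zero =>
    intro s v r hv hr hle t
    rw [show List.range' s 0 = [] from rfl, List.foldl_nil, if_neg (by omega)]
  | succ k ih =>
    intro s v r hv hr hle t
    have hsN : s < N := by omega
    rw [List.range'_succ, List.foldl_cons]
    have hstep : stepA N (v, (r : Int)) s =
        (v.set s (((r / 2 ^ (N - s - 1) : Nat) : Int)), ((r % 2 ^ (N - s - 1) : Nat) : Int)) := by
      simp only [stepA, Prod.mk.injEq]
      refine ⟨?_, ?_⟩
      · congr 1
        rw [show ((2 : Int) ^ (N - s - 1)) = ((2 ^ (N - s - 1) : Nat) : Int) by push_cast; ring]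
        exact PySem.Int.floordiv_natCast r (2 ^ (N - s - 1))
      · rw [show ((2 : Int) ^ (N - s - 1)) = ((2 ^ (N - s - 1) : Nat) : Int) by push_cast; ring]
        exact PySem.Int.mod_natCast r (2 ^ (N - s - 1))
    rw [hstep]
    have hr' : r % 2 ^ (N - s - 1) < 2 ^ (N - (s + 1)) := by
      have := Nat.mod_lt r (y := 2 ^ (N - s - 1)) (Nat.two_pow_pos _)
      simpa [show N - (s + 1) = N - s - 1 by omega] using this
    rw [ih (s + 1) _ _ (by simp [hv]) hr' (by omega) t]
    by_cases h1 : s + 1 ≤ t ∧ t < s + 1 + k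
    · rw [if_pos h1, if_pos (by omega)]
      congr 2
      exact mod_pow_div_mod r (N - 1 - t) (N - s - 1) (by omega)
    · rw [if_neg h1]
      by_cases h2 : t = s
      · rw [if_pos (by omega), h2, List.getElem?_set_self (by omega),
            show N - 1 - s = N - s - 1 by omega]
        congr 2
        have hlt : r / 2 ^ (N - s - 1) < 2 := by
          apply Nat.div_lt_of_lt_mul
          calc r < 2 ^ (N - s) := hr
          _ = 2 ^ (N - s - 1) * 2 := by rw [← pow_succ]; congr 1; omega
        rw [Nat.mod_eq_of_lt hlt]
      · rw [if_neg (by omega), List.getElem?_set_ne (by omega)]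

-- B's value at a natural-number index: shift-and-mask is the bit r / 2^k % 2
lemma shift_mask_bit (r k : Nat) :
    Int.land ((r : Int) >>> k) 1 = ((r / 2 ^ k % 2 : Nat) : Int) := by
  rw [show ((r : Int) >>> k) = ((r >>> k : Nat) : Int) from rfl,
      show Int.land ((r >>> k : Nat) : Int) 1 = (((r >>> k) &&& 1 : Nat) : Int) from rfl,
      Nat.and_one_is_mod, Nat.shiftRight_eq_div_pow]

-- B's list element-wise
lemma altB_get (r N t : Nat) :
    ((List.range N).reverse.map (fun (k : Nat) => Int.land ((r : Int) >>> k) 1))[t]? =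
      if t < N then some ((r / 2 ^ (N - 1 - t) % 2 : Nat) : Int) else none := by
  by_cases h : t < N
  · rw [if_pos h, List.getElem?_map, List.getElem?_reverse (by simpa using h),
        List.length_range, List.getElem?_range (by omega), Option.map_some, shift_mask_bit]
  · rw [if_neg h, List.getElem?_eq_none (by simpa using h)]

-- ===== VERDICT (by name: the statement is the Claim_ definition above) =====
theorem real2vec_spec : Claim_equal_real2vec := by
  intro i n _ hpre
  obtain ⟨hi0, hcase⟩ := hpre
  have hi : i = ((i.toNat : Nat) : Int) := (Int.toNat_of_nonneg hi0).symm
  have hlt : i.toNat < 2 ^ n.toNat := by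
    rcases hcase with ⟨hn, hb⟩ | ⟨_, hn, hz⟩
    · exact hb
    · have : n.toNat = 0 := by omega
      simp [this, hz]
  show real2vec i n = real2vec_alt i n
  unfold real2vec real2vec_alt
  rw [hi]
  apply List.ext_getElem?
  intro t
  rw [altB_get]
  rw [show List.range n.toNat = List.range' 0 n.toNat by simp [List.range_eq_range']]
  rw [foldA_get n.toNat n.toNat 0 _ _ (by simp) (by simpa using hlt) (by omega) t]
  by_cases h : t < n.toNat
  · rw [if_pos (by omega), if_pos h]
  · rw [if_neg (by omega), if_neg h, List.getElem?_eq_none (by simpa using h)]
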